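-- pv_equiv track=rewrite | github.com/QI1002/exampool | Leetcode/140.py | dictLink
-- ===== SOURCE A (Python) =====
-- def dictLink(d):
--     result = {}
--     for i in range(len(d)):
--         result[d[i]] = []
--         count = len(d[i])
--         for j in range(i+1, len(d), 1):
--             if (len(d[j]) <= count): continue
--             if (d[j][:count] == d[i]):
--                 derived = False
--                 for x in result[d[i]]:
--                     if (d[j][:len(x)] == x):
--                         derived = True
--                 if (derived == False):
--                     result[d[i]].append(d[j])
--
--     return result
-- ===== SOURCE B (Python) =====
-- def dictLink(d):
--     res = {}
--     for i, u in enumerate(d):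
--         cands = [w for w in d[i+1:] if len(w) > len(u) and w.startswith(u)]
--         seen = set()
--         out = []
--         for w in cands:
--             if not any(w[:l] in seen for l in range(len(u) + 1, len(w) + 1)):
--                 out.append(w)
--             seen.add(w)
--         res[u] = out
--     return res
-- ===== Notes on version B (the rewrite author's own statement) =====
-- stated objective: alternative
-- what changed: B first collects each word's longer prefix-extension candidates from the rest of the list, then filters them in one pass with a hash set of already-seen candidates, testing each prefix length of a candidate against the set, instead of A's rescanning of the kept list for every candidate inside triply nested index loops.
import Mathlib
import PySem

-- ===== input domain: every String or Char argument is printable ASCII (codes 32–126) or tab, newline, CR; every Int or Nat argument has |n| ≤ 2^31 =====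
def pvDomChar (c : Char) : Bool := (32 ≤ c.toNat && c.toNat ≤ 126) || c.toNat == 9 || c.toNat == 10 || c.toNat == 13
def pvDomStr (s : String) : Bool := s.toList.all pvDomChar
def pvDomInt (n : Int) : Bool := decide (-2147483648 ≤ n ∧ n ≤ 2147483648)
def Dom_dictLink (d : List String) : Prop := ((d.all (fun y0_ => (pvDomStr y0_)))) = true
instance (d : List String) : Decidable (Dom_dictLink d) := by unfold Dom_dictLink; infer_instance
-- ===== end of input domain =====

-- B replaces A's quadratic per-candidate scan of the kept list with a two-phase pass:
-- collect the prefix-extension candidates of each word, then keep a candidate iff none of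
-- its prefixes is an already-seen candidate (a set lookup per prefix length);
-- equivalence proved on all inputs (objective: alternative, not claimed faster).

-- ===== PORT A =====
-- the body of A's j-loop (reads/updates only key di of result)
def dictLinkStep (di : String) (count : Int) (result : PySem.Dict String (List String))
    (dj : String) : PySem.Dict String (List String) :=
  if PySem.Str.len dj ≤ count then result
  else if PySem.Str.slice dj none (some count) = di then
    (if ((result.getD di []).foldl
          (fun derived x => if PySem.Str.slice dj none (some (PySem.Str.len x)) = x then true else derived)
          false) = false
     then result.modify di [] (fun l => l ++ [dj]) else result)
  else result

def dictLink (d : List String) : List (String × List String) :=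
  ((PySem.List.pyRange 0 (PySem.List.len d) 1).foldl
    (fun result i =>
      let di := PySem.List.pyGetD d i ""
      (PySem.List.pyRange (i + 1) (PySem.List.len d) 1).foldl
        (fun result j => dictLinkStep di (PySem.Str.len di) result (PySem.List.pyGetD d j ""))
        (result.insert di []))
    PySem.Dict.empty).items

-- ===== PORT B =====
-- the body of B's candidate loop: state = (seen set, kept list)
def dictLinkAltStep (u : String) (p : PySem.Set String × List String)
    (w : String) : PySem.Set String × List String :=
  let keep := !((PySem.List.pyRange (PySem.Str.len u + 1) (PySem.Str.len w + 1) 1).any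
      (fun l => p.1.contains (PySem.Str.slice w none (some l))))
  (p.1.add w, if keep then p.2 ++ [w] else p.2)

def dictLink_alt (d : List String) : List (String × List String) :=
  ((PySem.List.enumerate d).foldl
    (fun res iu =>
      let u := iu.2
      let cands := (PySem.List.slice d (some (iu.1 + 1)) none).filter
          (fun w => decide (PySem.Str.len u < PySem.Str.len w) && PySem.Str.startswith w u)
      res.insert u (cands.foldl (dictLinkAltStep u) (([] : PySem.Set String), ([] : List String))).2)
    PySem.Dict.empty).items

-- ===== PRECONDITION & SPEC =====
def Spec_dictLink (d : List String) (out : List (String × List String)) : Prop := out = dictLink_alt d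
instance (d : List String) (out : List (String × List String)) : Decidable (Spec_dictLink d out) := by unfold Spec_dictLink; infer_instance

-- ===== CLAIM (what is proved, stated in full; the proofs are below) =====
def Claim_equal_dictLink : Prop := ∀ (d : List String), Dom_dictLink d → Spec_dictLink d (dictLink d)

-- ===== LEMMAS AND PROOFS =====

-- A's prefix test 'd[j][:len(x)] == x' is the list prefix relation
lemma pvStartswithIff (u w : String) : PySem.Str.startswith w u = true ↔ u.toList <+: w.toList := by
  rw [PySem.Str.startswith_eq]; exact PySem.Chars.startswith_iff _ _

lemma pvSliceEq (x w : String) :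
    (PySem.Str.slice w none (some (PySem.Str.len x)) = x) ↔ x.toList <+: w.toList := by
  rw [← String.toList_inj, PySem.Str.toList_slice, PySem.Chars.slice_eq_listSlice,
      PySem.Str.len_eq, PySem.List.slice_to_natCast]
  exact ⟨fun h => h ▸ List.take_prefix _ _, fun h => ((List.prefix_iff_eq_take).1 h).symm⟩

-- A's value-level step on the kept list (what dictLinkStep does to result[di])
def pvValStep (di : String) (count : Int) (acc : List String) (w : String) : List String :=
  if PySem.Str.len w ≤ count then acc
  else if PySem.Str.slice w none (some count) = di then
    (if (acc.foldl
          (fun derived x => if PySem.Str.slice w none (some (PySem.Str.len x)) = x then true else derived)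
          false) = false
     then acc ++ [w] else acc)
  else acc

-- the common kept-list step, phrased with List.any over the prefix relation
def pvKeepIf (_u : String) (acc : List String) (w : String) : List String :=
  if acc.any (fun x => decide (x.toList <+: w.toList)) then acc else acc ++ [w]

lemma pvDerivedFold (w : String) (l : List String) (b : Bool) :
    l.foldl (fun derived x => if PySem.Str.slice w none (some (PySem.Str.len x)) = x then true else derived) b
      = (b || l.any (fun x => decide (x.toList <+: w.toList))) := by
  induction l generalizing b with
  | nil => simp
  | cons y t ih =>
    have hb : (if PySem.Str.slice w none (some (PySem.Str.len y)) = y then true else b)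
        = (b || decide (y.toList <+: w.toList)) := by
      by_cases h : PySem.Str.slice w none (some (PySem.Str.len y)) = y
      · simp only [if_pos h, decide_eq_true ((pvSliceEq y w).1 h), Bool.or_true]
      · simp only [if_neg h, decide_eq_false (fun hp => h ((pvSliceEq y w).2 hp)), Bool.or_false]
    simp only [List.foldl_cons, List.any_cons, hb, ih, Bool.or_assoc]

lemma pvInnerInsert (di : String) (count : Int) (t : List String)
    (res : PySem.Dict String (List String)) (acc : List String) :
    t.foldl (dictLinkStep di count) (res.insert di acc)
      = res.insert di (t.foldl (pvValStep di count) acc) := by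
  induction t generalizing acc with
  | nil => rfl
  | cons w t ih =>
    simp only [List.foldl_cons]
    have hstep : dictLinkStep di count (res.insert di acc) w
        = res.insert di (pvValStep di count acc w) := by
      unfold dictLinkStep pvValStep PySem.Dict.modify
      simp only [PySem.Dict.getD_insert_self, PySem.Dict.insert_insert_self]
      split_ifs <;> rfl
    rw [hstep, ih]

lemma pvValFilter (u : String) (t : List String) (acc : List String) :
    t.foldl (pvValStep u (PySem.Str.len u)) acc
      = (t.filter (fun w => decide (PySem.Str.len u < PySem.Str.len w) && PySem.Str.startswith w u)).foldl
          (pvKeepIf u) acc := by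
  induction t generalizing acc with
  | nil => rfl
  | cons w t ih =>
    simp only [List.foldl_cons, List.filter_cons]
    by_cases hc : (decide (PySem.Str.len u < PySem.Str.len w) && PySem.Str.startswith w u) = true
    · have hc2 := hc
      simp only [Bool.and_eq_true] at hc2
      obtain ⟨hlt, hsw⟩ := hc2
      have hlt' : PySem.Str.len u < PySem.Str.len w := of_decide_eq_true hlt
      have hstep : pvValStep u (PySem.Str.len u) acc w = pvKeepIf u acc w := by
        unfold pvValStep pvKeepIf
        rw [if_neg (by omega : ¬ PySem.Str.len w ≤ PySem.Str.len u),
            if_pos ((pvSliceEq u w).2 ((pvStartswithIff u w).1 hsw)),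
            pvDerivedFold w acc false, Bool.false_or]
        cases h : acc.any (fun x => decide (x.toList <+: w.toList)) <;> simp
      rw [hstep, if_pos hc, List.foldl_cons, ih]
    · have hstep : pvValStep u (PySem.Str.len u) acc w = acc := by
        unfold pvValStep
        by_cases hlen : PySem.Str.len w ≤ PySem.Str.len u
        · rw [if_pos hlen]
        · have hsw : ¬ PySem.Str.startswith w u = true := by
            intro hsw
            exact hc (by simp only [Bool.and_eq_true]; exact ⟨decide_eq_true (by omega), hsw⟩)
          rw [if_neg hlen, if_neg (fun hs => hsw ((pvStartswithIff u w).2 ((pvSliceEq u w).1 hs)))]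
      rw [hstep, if_neg hc, ih]

-- B's prefix-in-seen check equals "some seen candidate is a prefix of w"
lemma pvCheckB (u w : String) (seen : PySem.Set String)
    (hlen : ∀ c ∈ seen, u.toList.length < c.toList.length) :
    ((PySem.List.pyRange (PySem.Str.len u + 1) (PySem.Str.len w + 1) 1).any
        (fun l => seen.contains (PySem.Str.slice w none (some l))) = true)
      ↔ ∃ c ∈ seen, c.toList <+: w.toList := by
  rw [List.any_eq_true]
  constructor
  · rintro ⟨l, hl, hcont⟩
    obtain ⟨hl1, hl2⟩ := PySem.List.mem_pyRange_one.1 hl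
    have hl0 : (0:Int) ≤ l := by
      have := PySem.Str.len_eq u; omega
    have hmem : PySem.Str.slice w none (some l) ∈ seen := by
      simpa [PySem.Set.contains] using hcont
    refine ⟨_, hmem, ?_⟩
    rw [PySem.Str.toList_slice, PySem.Chars.slice_eq_listSlice, PySem.List.slice_to w.toList hl0]
    exact List.take_prefix _ _
  · rintro ⟨c, hc, hpre⟩
    refine ⟨(c.toList.length : Int), ?_, ?_⟩
    · rw [PySem.List.mem_pyRange_one]
      have h1 := hlen c hc
      have h2 := hpre.length_le
      rw [PySem.Str.len_eq, PySem.Str.len_eq]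
      omega
    · have heq : PySem.Str.slice w none (some (c.toList.length : Int)) = c := by
        have := (pvSliceEq c w).2 hpre
        rwa [PySem.Str.len_eq] at this
      rw [heq]
      simpa [PySem.Set.contains] using hc

-- core loop correspondence: A's kept-list filter vs B's seen-set filter
lemma pvCore (u : String) (cs : List String) (seen : PySem.Set String) (out : List String)
    (hcs : ∀ c ∈ cs, u.toList.length < c.toList.length)
    (hseen : ∀ c ∈ seen, u.toList.length < c.toList.length)
    (hsub : ∀ x ∈ out, x ∈ seen)
    (hinv : ∀ v : String, (∃ c ∈ seen, c.toList <+: v.toList) → ∃ x ∈ out, x.toList <+: v.toList) :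
    cs.foldl (pvKeepIf u) out = (cs.foldl (dictLinkAltStep u) (seen, out)).2 := by
  induction cs generalizing seen out with
  | nil => rfl
  | cons w cs ih =>
    have hlenw := hcs w (List.mem_cons_self)
    simp only [List.foldl_cons]
    by_cases hex : ∃ x ∈ out, x.toList <+: w.toList
    · have hA : pvKeepIf u out w = out := by
        unfold pvKeepIf
        rw [if_pos (List.any_eq_true.2 (by
          obtain ⟨x, hx, hp⟩ := hex
          exact ⟨x, hx, decide_eq_true hp⟩))]
      have hBany : ((PySem.List.pyRange (PySem.Str.len u + 1) (PySem.Str.len w + 1) 1).any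
          (fun l => seen.contains (PySem.Str.slice w none (some l)))) = true := by
        apply (pvCheckB u w seen hseen).2
        obtain ⟨x, hx, hp⟩ := hex
        exact ⟨x, hsub x hx, hp⟩
      have hB : dictLinkAltStep u (seen, out) w = (seen.add w, out) := by
        unfold dictLinkAltStep
        rw [hBany]; rfl
      rw [hA, hB]
      refine ih _ _ (fun c hc => hcs c (List.mem_cons_of_mem _ hc)) ?_ ?_ ?_
      · intro c hc
        rcases (PySem.Set.mem_add seen w c).1 hc with h | h
        · exact hseen c h
        · subst h; exact hlenw
      · intro x hx
        exact (PySem.Set.mem_add seen w x).2 (Or.inl (hsub x hx))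
      · intro v hv
        obtain ⟨c, hc, hp⟩ := hv
        rcases (PySem.Set.mem_add seen w c).1 hc with h | h
        · exact hinv v ⟨c, h, hp⟩
        · subst h
          obtain ⟨x, hx, hpx⟩ := hex
          exact ⟨x, hx, hpx.trans hp⟩
    · have hA : pvKeepIf u out w = out ++ [w] := by
        unfold pvKeepIf
        rw [if_neg (by
          intro h
          obtain ⟨x, hx, hp⟩ := List.any_eq_true.1 h
          exact hex ⟨x, hx, of_decide_eq_true hp⟩)]
      have hBany : ((PySem.List.pyRange (PySem.Str.len u + 1) (PySem.Str.len w + 1) 1).any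
          (fun l => seen.contains (PySem.Str.slice w none (some l)))) = false := by
        rw [← Bool.not_eq_true]
        intro h
        exact hex (hinv w ((pvCheckB u w seen hseen).1 h))
      have hB : dictLinkAltStep u (seen, out) w = (seen.add w, out ++ [w]) := by
        unfold dictLinkAltStep
        rw [hBany]; rfl
      rw [hA, hB]
      refine ih _ _ (fun c hc => hcs c (List.mem_cons_of_mem _ hc)) ?_ ?_ ?_
      · intro c hc
        rcases (PySem.Set.mem_add seen w c).1 hc with h | h
        · exact hseen c h
        · subst h; exact hlenw
      · intro x hx
        rcases List.mem_append.1 hx with h | h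
        · exact (PySem.Set.mem_add seen w x).2 (Or.inl (hsub x h))
        · rw [List.mem_singleton.1 h]
          exact (PySem.Set.mem_add seen w w).2 (Or.inr rfl)
      · intro v hv
        obtain ⟨c, hc, hp⟩ := hv
        rcases (PySem.Set.mem_add seen w c).1 hc with h | h
        · obtain ⟨x, hx, hpx⟩ := hinv v ⟨c, h, hp⟩
          exact ⟨x, List.mem_append.2 (Or.inl hx), hpx⟩
        · exact ⟨c, List.mem_append.2 (Or.inr (List.mem_singleton.2 h)), hp⟩

-- the per-word kept lists of A and B coincide
lemma pvBody (u : String) (t : List String) :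
    t.foldl (pvValStep u (PySem.Str.len u)) []
      = ((t.filter (fun w => decide (PySem.Str.len u < PySem.Str.len w) && PySem.Str.startswith w u)).foldl
          (dictLinkAltStep u) (([] : PySem.Set String), ([] : List String))).2 := by
  rw [pvValFilter]
  apply pvCore
  · intro c hc
    have := (List.mem_filter.1 hc).2
    simp only [Bool.and_eq_true, decide_eq_true_eq, PySem.Str.len_eq] at this
    exact_mod_cast this.1
  · intro c hc; cases hc
  · intro x hx; cases hx
  · intro v hv; obtain ⟨c, hc, _⟩ := hv; cases hc

-- ===== VERDICT (by name: the statement is the Claim_ definition above) =====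
theorem dictLink_spec : Claim_equal_dictLink := by
  intro d _
  unfold Spec_dictLink dictLink dictLink_alt
  rw [PySem.List.enumerate_eq_map_pyRange d "", List.foldl_map]
  congr 1
  apply PySem.List.foldl_congr_mem
  intro res i hi
  obtain ⟨hi0, hilt⟩ := PySem.List.mem_pyRange_one.1 hi
  simp only
  rw [PySem.List.foldl_pyRange_pyGetD d "" (dictLinkStep (PySem.List.pyGetD d i "") (PySem.Str.len (PySem.List.pyGetD d i ""))) _ (by omega : (0:Int) ≤ i + 1)]
  rw [pvInnerInsert, PySem.List.slice_from d (by omega : (0:Int) ≤ i + 1), pvBody]
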